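-- pv_equiv track=rewrite | github.com/spezifisch/leetcode-problems | find-common-characters/one.py | getMinimumHistogram
-- ===== SOURCE A (Python) =====
-- from typing import List
--
-- from collections import defaultdict
--
-- def getMinimumHistogram(hists: List[defaultdict]) -> dict:
--     if not len(hists):
--         return {}
--
--     merge = dict(hists[0])
--     for hist in hists[1:]:
--         merge_deletions = []
--         for key in merge.keys():
--             if key in hist:
--                 merge[key] = min(merge[key], hist[key])
--             else:
--                 merge_deletions.append(key)
--
--         for merge_key in merge_deletions:
--             del merge[merge_key]
--
--     return merge
-- ===== SOURCE B (Python) =====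
-- def getMinimumHistogram(hists):
--     if not hists:
--         return {}
--     return {k: min(h[k] for h in hists)
--             for k in hists[0]
--             if all(k in h for h in hists)}
-- ===== Notes on version B (the rewrite author's own statement) =====
-- stated objective: simpler
-- what changed: Replaces the incremental prune-and-update loop over a mutable merge dict (collect deletions, then delete) with a single dict comprehension over the first histogram's keys that keeps a key iff it occurs in every histogram and takes the minimum value across all histograms.
import Mathlib
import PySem

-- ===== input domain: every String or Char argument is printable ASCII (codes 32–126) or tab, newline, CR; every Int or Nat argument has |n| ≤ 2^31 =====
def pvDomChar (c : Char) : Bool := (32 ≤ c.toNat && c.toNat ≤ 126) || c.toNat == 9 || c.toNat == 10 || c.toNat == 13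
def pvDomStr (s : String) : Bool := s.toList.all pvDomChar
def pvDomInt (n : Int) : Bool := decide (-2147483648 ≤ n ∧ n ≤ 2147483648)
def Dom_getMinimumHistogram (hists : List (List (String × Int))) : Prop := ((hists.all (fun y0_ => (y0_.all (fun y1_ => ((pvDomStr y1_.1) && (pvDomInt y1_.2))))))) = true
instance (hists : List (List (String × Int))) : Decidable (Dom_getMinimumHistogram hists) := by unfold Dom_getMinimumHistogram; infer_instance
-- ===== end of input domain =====

-- B replaces A's incremental prune-and-update over a mutable merge dict with a single
-- comprehension over the first histogram's keys (keep a key iff present in every histogram,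
-- value = minimum across all histograms); objective: simpler.


-- Each inner list encodes a Python dict (histogram); both ports read it through
-- PySem.Dict.ofList (the identity on the duplicate-free association lists that encode a
-- dict), so the two helpers below are exactly Python's `k in hist` and `hist[k]`.
def gmhHas (hist : List (String × Int)) (k : String) : Bool :=
  (PySem.Dict.ofList hist).contains k

def gmhVal (hist : List (String × Int)) (k : String) : Int :=
  (PySem.Dict.ofList hist).getD k 0

-- ===== PORT A =====
-- body of A's `for hist in hists[1:]` loop: one inner pass over merge.keys() collecting
-- updates and deletions, then the deletion pass
def gmhStep (merge : PySem.Dict String Int) (hist : List (String × Int)) : PySem.Dict String Int :=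
  let st := merge.keys.foldl
    (fun (p : PySem.Dict String Int × List String) key =>
      if gmhHas hist key then
        (p.1.insert key (min (p.1.getD key 0) (gmhVal hist key)), p.2)
      else
        (p.1, p.2 ++ [key]))
    (merge, ([] : List String))
  st.2.foldl (fun m mergeKey => m.erase mergeKey) st.1

def getMinimumHistogram (hists : List (List (String × Int))) : List (String × Int) :=
  match hists with
  | [] => []
  | h0 :: rest => (rest.foldl gmhStep (PySem.Dict.ofList h0)).items

-- ===== PORT B =====
-- min(h[k] for h in hists): first value, then running min
def gmhMin (vs : List Int) : Int :=
  match vs with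
  | [] => 0          -- unreachable: B only evaluates it with a nonempty hists
  | v :: t => t.foldl min v

def getMinimumHistogram_alt (hists : List (List (String × Int))) : List (String × Int) :=
  match hists with
  | [] => []
  | h0 :: rest =>
    (((PySem.Dict.ofList h0).keys.filter
        (fun k => (h0 :: rest).all (fun hist => gmhHas hist k))).foldl
      (fun d k => d.insert k (gmhMin ((h0 :: rest).map (fun hist => gmhVal hist k))))
      PySem.Dict.empty).items

-- ===== PRECONDITION & SPEC =====
def Spec_getMinimumHistogram (hists : List (List (String × Int))) (out : List (String × Int)) : Prop := out = getMinimumHistogram_alt hists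
instance (hists : List (List (String × Int))) (out : List (String × Int)) : Decidable (Spec_getMinimumHistogram hists out) := by unfold Spec_getMinimumHistogram; infer_instance

-- ===== CLAIM (what is proved, stated in full; the proofs are below) =====
def Claim_equal_getMinimumHistogram : Prop := ∀ (hists : List (List (String × Int))), Dom_getMinimumHistogram hists → Spec_getMinimumHistogram hists (getMinimumHistogram hists)

-- ===== LEMMAS AND PROOFS =====

-- folding `del merge[k]` over a list of keys filters the items
theorem gmh_erase_fold (L : List String) (d : PySem.Dict String Int) :
    (L.foldl (fun m k => m.erase k) d).items
      = d.items.filter (fun p => !L.any (fun k => p.1 == k)) := by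
  induction L generalizing d with
  | nil => simp
  | cons k L ih =>
    rw [List.foldl_cons, ih, PySem.Dict.erase, List.filter_filter]
    apply List.filter_congr
    intro p _
    simp [Bool.and_comm]

-- folding `merge[k] = min(merge[k], hist[k])` over distinct existing keys maps the items
theorem gmh_upd_fold (hist : List (String × Int)) (ks : List String)
    (d : PySem.Dict String Int) (hks : ks.Nodup)
    (hsub : ∀ k ∈ ks, d.contains k = true) (hnd : d.keys.Nodup) :
    (ks.foldl (fun m k => m.insert k (min (m.getD k 0) (gmhVal hist k))) d).items
      = d.items.map (fun p => if p.1 ∈ ks then (p.1, min p.2 (gmhVal hist p.1)) else p) := by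
  induction ks generalizing d with
  | nil => simp
  | cons k ks ih =>
    have hc : d.contains k = true := hsub k (List.mem_cons_self ..)
    rw [List.foldl_cons]
    set d1 := d.insert k (min (d.getD k 0) (gmhVal hist k)) with hd1
    have hitems : d1.items = d.items.map (fun p => if p.1 == k then (k, min (d.getD k 0) (gmhVal hist k)) else p) :=
      PySem.Dict.items_insert_of_contains d _ hc
    have hkeys : d1.keys = d.keys := by
      rw [PySem.Dict.keys, PySem.Dict.keys, hitems, List.map_map]
      apply List.map_congr_left
      intro p _
      by_cases h : p.1 = k <;> simp [h]
    have hnd1 : d1.keys.Nodup := hkeys ▸ hnd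
    have hsub1 : ∀ j ∈ ks, d1.contains j = true := by
      intro j hj
      rw [PySem.Dict.contains_eq_decide_mem_keys, hkeys, ← PySem.Dict.contains_eq_decide_mem_keys]
      exact hsub j (List.mem_cons_of_mem _ hj)
    rw [ih d1 hks.of_cons hsub1 hnd1, hitems, List.map_map]
    apply List.map_congr_left
    intro p hp
    by_cases h : p.1 = k
    · have hval : d.getD k 0 = p.2 := by
        rw [← h]
        have hm : (p.1, p.2) ∈ d.items := by simpa using hp
        exact PySem.Dict.getD_of_mem_items d hm hnd 0
      have hnotin : k ∉ ks := (List.nodup_cons.mp hks).1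
      simp [Function.comp, h, hval, hnotin]
    · simp [Function.comp, h]

-- one pass of A's outer loop keeps exactly the keys occurring in hist, at the min value
theorem gmh_step_items (d : PySem.Dict String Int) (hist : List (String × Int))
    (hnd : d.keys.Nodup) :
    (gmhStep d hist).items
      = (d.items.filter (fun p => gmhHas hist p.1)).map
          (fun p => (p.1, min p.2 (gmhVal hist p.1))) := by
  have hbody : (fun (p : PySem.Dict String Int × List String) key =>
      if gmhHas hist key then
        (p.1.insert key (min (p.1.getD key 0) (gmhVal hist key)), p.2)
      else
        (p.1, p.2 ++ [key]))
    = (fun (p : PySem.Dict String Int × List String) key =>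
      ((fun m k => if gmhHas hist k then m.insert k (min (m.getD k 0) (gmhVal hist k)) else m) p.1 key,
       (fun l k => if gmhHas hist k then l else l ++ [k]) p.2 key)) := by
    funext p key
    by_cases h : gmhHas hist key <;> simp [h]
  have hsplit : d.keys.foldl
      (fun (p : PySem.Dict String Int × List String) key =>
        if gmhHas hist key then
          (p.1.insert key (min (p.1.getD key 0) (gmhVal hist key)), p.2)
        else
          (p.1, p.2 ++ [key])) (d, ([] : List String))
      = (d.keys.foldl (fun m k => if gmhHas hist k then m.insert k (min (m.getD k 0) (gmhVal hist k)) else m) d,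
         d.keys.foldl (fun l k => if gmhHas hist k then l else l ++ [k]) ([] : List String)) := by
    rw [hbody]
    exact PySem.List.foldl_prod_mk
      (f := fun (m : PySem.Dict String Int) (k : String) =>
        if gmhHas hist k then m.insert k (min (m.getD k 0) (gmhVal hist k)) else m)
      (g := fun (l : List String) (k : String) => if gmhHas hist k then l else l ++ [k])
      (l := d.keys) (a := d) (b := ([] : List String))
  rw [gmhStep]
  rw [hsplit]
  rw [PySem.List.foldl_if_eq_foldl_filter]
  have hbody2 : (fun (l : List String) k => if gmhHas hist k then l else l ++ [k])
      = (fun l k => if !gmhHas hist k then l ++ [k] else l) := by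
    funext l k
    by_cases h : gmhHas hist k <;> simp [h]
  rw [hbody2, PySem.List.foldl_append_if_eq_filter, gmh_erase_fold,
      gmh_upd_fold hist _ d (hnd.filter _)
        (fun k hk => by
          rw [PySem.Dict.contains_eq_decide_mem_keys]
          simpa using (List.mem_filter.mp hk).1) hnd,
      List.nil_append, List.filter_map]
  have hfil : ∀ p ∈ d.items,
      ((fun q => !((d.keys.filter (fun k => !gmhHas hist k)).any (fun k => q.1 == k))) ∘
        (fun p => if p.1 ∈ d.keys.filter (gmhHas hist) then (p.1, min p.2 (gmhVal hist p.1)) else p)) p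
      = gmhHas hist p.1 := by
    intro p hp
    have hpk : p.1 ∈ d.keys := List.mem_map_of_mem hp
    have hfst : (if p.1 ∈ List.filter (gmhHas hist) d.keys then (p.1, min p.2 (gmhVal hist p.1)) else p).1 = p.1 := by
      split <;> rfl
    simp only [Function.comp_apply, hfst]
    cases hh : gmhHas hist p.1 with
    | true =>
      simp only [Bool.not_eq_true', List.any_eq_false]
      intro x hx
      rcases List.mem_filter.mp hx with ⟨-, hfx⟩
      simp only [Bool.not_eq_true'] at hfx
      simp only [beq_iff_eq]
      intro heq
      rw [heq] at hh
      rw [hh] at hfx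
      exact absurd hfx (by simp)
    | false =>
      have hmem : p.1 ∈ d.keys.filter (fun k => !gmhHas hist k) :=
        List.mem_filter.mpr ⟨hpk, by simp [hh]⟩
      simp only [Bool.not_eq_false', List.any_eq_true]
      exact ⟨p.1, hmem, by simp⟩
  rw [List.filter_congr hfil]
  apply List.map_congr_left
  intro p hp
  have hpk : p.1 ∈ d.keys := List.mem_map_of_mem (List.mem_of_mem_filter hp)
  have hc : gmhHas hist p.1 = true := by simpa using (List.mem_filter.mp hp).2
  simp [List.mem_filter, hpk, hc]

theorem gmh_step_keys_nodup (d : PySem.Dict String Int) (hist : List (String × Int))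
    (hnd : d.keys.Nodup) : (gmhStep d hist).keys.Nodup := by
  rw [PySem.Dict.keys, gmh_step_items d hist hnd, List.map_map]
  have : ((fun (p : String × Int) => p.1) ∘ fun p => (p.1, min p.2 (gmhVal hist p.1)))
      = fun (p : String × Int) => p.1 := rfl
  rw [this]
  exact hnd.sublist (List.filter_sublist.map _)

-- A's whole outer loop keeps the keys occurring in every later histogram, folding min
theorem gmh_loop_items (rest : List (List (String × Int))) (d : PySem.Dict String Int)
    (hnd : d.keys.Nodup) :
    (rest.foldl gmhStep d).items
      = (d.items.filter (fun p => rest.all (fun h => gmhHas h p.1))).map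
          (fun p => (p.1, rest.foldl (fun v h => min v (gmhVal h p.1)) p.2)) := by
  induction rest generalizing d with
  | nil => simp
  | cons h t ih =>
    rw [List.foldl_cons, ih _ (gmh_step_keys_nodup d h hnd), gmh_step_items d h hnd,
       List.filter_map, List.map_map, List.filter_filter]
    simp only [Function.comp, List.all_cons, List.foldl_cons]
    rw [show (fun (a : String × Int) => (t.all fun hh => gmhHas hh a.1) && gmhHas h a.1)
        = (fun (a : String × Int) => gmhHas h a.1 && t.all fun hh => gmhHas hh a.1) from
      funext fun a => Bool.and_comm ..]
    rfl

-- ===== VERDICT (by name: the statement is the Claim_ definition above) =====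
theorem getMinimumHistogram_spec : Claim_equal_getMinimumHistogram := by
  intro hists _
  unfold Spec_getMinimumHistogram
  cases hists with
  | nil => rfl
  | cons h0 rest =>
    have hnd : (PySem.Dict.ofList h0).keys.Nodup := PySem.Dict.nodup_keys_ofList h0
    show (rest.foldl gmhStep (PySem.Dict.ofList h0)).items = _
    rw [gmh_loop_items rest _ hnd]
    show _ = (((PySem.Dict.ofList h0).keys.filter
        (fun k => (h0 :: rest).all (fun hist => gmhHas hist k))).foldl
      (fun d k => d.insert k (gmhMin ((h0 :: rest).map (fun hist => gmhVal hist k))))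
      PySem.Dict.empty).items
    rw [PySem.Dict.items_foldl_insert_fresh _ (fun k => k)
        (fun k => gmhMin ((h0 :: rest).map (fun hist => gmhVal hist k)))
        PySem.Dict.empty
        (fun a _ => PySem.Dict.contains_empty a)
        (by simpa using hnd.filter _)]
    rw [PySem.Dict.keys, List.filter_map, List.map_map]
    show _ = PySem.Dict.empty.items ++ _
    rw [show PySem.Dict.empty.items = ([] : List (String × Int)) from rfl, List.nil_append]
    have hfil : ∀ p ∈ (PySem.Dict.ofList h0).items,
        ((fun k => (h0 :: rest).all (fun hist => gmhHas hist k)) ∘ (fun (p : String × Int) => p.1)) p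
          = (fun p : String × Int => rest.all (fun h => gmhHas h p.1)) p := by
      intro p hp
      have hk : p.1 ∈ (PySem.Dict.ofList h0).keys := List.mem_map_of_mem hp
      have hc : gmhHas h0 p.1 = true := by
        rw [gmhHas, PySem.Dict.contains_eq_decide_mem_keys]
        simpa using hk
      simp [Function.comp, List.all_cons, hc]
    rw [List.filter_congr hfil]
    apply List.map_congr_left
    intro p hp
    have hp' : p ∈ (PySem.Dict.ofList h0).items := List.mem_of_mem_filter hp
    have hpp : (p.1, p.2) ∈ (PySem.Dict.ofList h0).items := by simpa using hp'
    have hval : gmhVal h0 p.1 = p.2 :=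
      PySem.Dict.getD_of_mem_items (PySem.Dict.ofList h0) hpp hnd 0
    simp only [Function.comp, List.map_cons, gmhMin, hval, List.foldl_map]
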